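-- pv_equiv track=rewrite | github.com/laptq1909/btvn-tdtt | HW week7/b4.py | most_occur
-- ===== SOURCE A (Python) =====
-- def most_occur(n):
--     count = {}
--     for num in n:
--         if num in count:
--             count[num] += 1
--         else:
--             count[num] = 1
--     max_count = max(count.values())
--     most_frequent = []
--     for num, cnt in count.items():
--         if cnt == max_count:
--             most_frequent.append(num)
--     return min(most_frequent)
-- ===== SOURCE B (Python) =====
-- def most_occur(n):
--     count = {}
--     for num in n:
--         count[num] = count.get(num, 0) + 1
--     best = None
--     for num, cnt in count.items():
--         if best is None or cnt > best[1] or (cnt == best[1] and num < best[0]):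
--             best = (num, cnt)
--     return best[0]
-- ===== Notes on version B (the rewrite author's own statement) =====
-- stated objective: simpler
-- what changed: B replaces A's three post-count passes (max over values, filter into a list, min of that list) by one selection loop over the counted items keeping the element with highest count and, on ties, the smallest value; the counting loop uses dict.get instead of a membership branch.
import Mathlib
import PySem

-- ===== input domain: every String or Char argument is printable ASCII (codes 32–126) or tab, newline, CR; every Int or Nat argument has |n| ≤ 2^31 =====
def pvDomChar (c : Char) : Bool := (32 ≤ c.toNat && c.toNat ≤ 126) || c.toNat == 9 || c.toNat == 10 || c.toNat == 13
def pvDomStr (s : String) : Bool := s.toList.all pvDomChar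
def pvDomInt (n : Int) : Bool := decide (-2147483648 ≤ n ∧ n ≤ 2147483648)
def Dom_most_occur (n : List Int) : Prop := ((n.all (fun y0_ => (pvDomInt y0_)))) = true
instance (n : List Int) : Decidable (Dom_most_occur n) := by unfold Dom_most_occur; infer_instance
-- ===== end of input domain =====

-- B merges A's three post-count passes (max over values, filter, min) into one selection loop over the items.

-- ===== PORT A =====
def most_occur (n : List Int) : Int :=
  let count := n.foldl (fun d num =>
      if d.contains num then d.insert num (d.getD num 0 + 1) else d.insert num 1)
    (PySem.Dict.empty : PySem.Dict Int Int)
  let max_count := (PySem.List.max? count.values (fun y => y)).getD 0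
  let most_frequent := count.items.foldl
    (fun acc p => if p.2 == max_count then acc ++ [p.1] else acc) []
  (PySem.List.min? most_frequent (fun y => y)).getD 0

-- ===== PORT B =====
-- B's selection step: take p if it has a strictly higher count, or the same count and a smaller value
def selStep (b : Option (Int × Int)) (p : Int × Int) : Option (Int × Int) :=
  match b with
  | none => some p
  | some q => if p.2 > q.2 ∨ (p.2 = q.2 ∧ p.1 < q.1) then some p else some q

def most_occur_alt (n : List Int) : Int :=
  let count := n.foldl (fun d num => d.insert num (d.getD num 0 + 1))
    (PySem.Dict.empty : PySem.Dict Int Int)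
  match count.items.foldl selStep none with
  | some b => b.1
  | none => 0   -- best is None: Python raises TypeError here; excluded by Pre_

-- ===== PRECONDITION & SPEC =====
-- Pre_ excludes only the empty list, on which A raises ValueError (max of an empty sequence) and B raises TypeError.
def Pre_most_occur (n : List Int) : Prop := n ≠ []
instance (n : List Int) : Decidable (Pre_most_occur n) := by unfold Pre_most_occur; infer_instance
def pvWitness_most_occur : List Int := ([1, 2, 2, 3])
def Spec_most_occur (n : List Int) (out : Int) : Prop := out = most_occur_alt n
instance (n : List Int) (out : Int) : Decidable (Spec_most_occur n out) := by unfold Spec_most_occur; infer_instance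

-- ===== CLAIM (what is proved, stated in full; the proofs are below) =====
def Claim_equal_most_occur : Prop := ∀ (n : List Int), Dom_most_occur n → Pre_most_occur n → Spec_most_occur n (most_occur n)

-- ===== LEMMAS AND PROOFS =====

-- the two counting loops build the same dict
theorem counts_eq (n : List Int) :
    n.foldl (fun d num =>
        if d.contains num then d.insert num (d.getD num 0 + 1) else d.insert num 1)
      (PySem.Dict.empty : PySem.Dict Int Int)
    = n.foldl (fun d num => d.insert num (d.getD num 0 + 1)) PySem.Dict.empty := by
  apply PySem.List.foldl_congr_mem
  intro d x _
  by_cases h : d.contains x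
  · simp [h]
  · have h' : d.contains x = false := eq_false_of_ne_true h
    simp [h', PySem.Dict.getD_of_not_contains d 0 h']

-- invariant of B's selection fold started from `some x`:
-- the result is an element with maximal count and, among those, minimal first component
theorem sel_inv (l : List (Int × Int)) : ∀ (x : Int × Int),
    ∃ b, l.foldl selStep (some x) = some b ∧ b ∈ x :: l ∧
      (∀ q ∈ x :: l, q.2 ≤ b.2 ∧ (q.2 = b.2 → b.1 ≤ q.1)) := by
  induction l with
  | nil =>
    intro x
    refine ⟨x, rfl, by simp, ?_⟩
    intro q hq; simp only [List.mem_cons, List.not_mem_nil, or_false] at hq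
    subst hq; exact ⟨le_refl _, fun _ => le_refl _⟩
  | cons p l ih =>
    intro x
    have hstep : (p :: l).foldl selStep (some x) = l.foldl selStep (selStep (some x) p) := rfl
    by_cases h : p.2 > x.2 ∨ (p.2 = x.2 ∧ p.1 < x.1)
    · obtain ⟨b, hb, hmem, hinv⟩ := ih p
      refine ⟨b, ?_, ?_, ?_⟩
      · rw [hstep]; simpa only [selStep, if_pos h] using hb
      · rcases List.mem_cons.mp hmem with h1 | h1
        · simp [h1]
        · simp [h1]
      · intro q hq
        rcases List.mem_cons.mp hq with rfl | hq
        · have hp := hinv p (by simp)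
          rcases h with h | ⟨h2, h1⟩
          · exact ⟨le_trans (le_of_lt h) hp.1, fun hq2 => by have := hp.1; omega⟩
          · exact ⟨by omega, fun hq2 => by have := hp.2 (by omega); omega⟩
        · exact hinv q hq
    · obtain ⟨b, hb, hmem, hinv⟩ := ih x
      refine ⟨b, ?_, ?_, ?_⟩
      · rw [hstep]; simpa only [selStep, if_neg h] using hb
      · rcases List.mem_cons.mp hmem with h1 | h1
        · simp [h1]
        · simp [h1]
      · intro q hq
        rcases List.mem_cons.mp hq with rfl | hq
        · exact hinv q (by simp)
        · rcases List.mem_cons.mp hq with rfl | hq2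
          · have hx := hinv x (by simp)
            have hx1 := hx.1
            refine ⟨by omega, fun hq2 => ?_⟩
            have hx2 := hx.2 (by omega)
            omega
          · exact hinv q (by simp [hq2])

-- A's append-if fold is filter-then-map-fst
theorem foldl_filter_firsts (M : Int) (l : List (Int × Int)) : ∀ (acc : List Int),
    l.foldl (fun acc p => if p.2 == M then acc ++ [p.1] else acc) acc
    = acc ++ (l.filter (fun p => p.2 == M)).map Prod.fst := by
  induction l with
  | nil => intro acc; simp
  | cons p l ih =>
    intro acc
    by_cases h : p.2 == M
    · rw [List.foldl_cons, if_pos h, ih]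
      simp [h]
    · rw [List.foldl_cons, if_neg h, ih]
      simp [h]

-- core equality over the (nonempty) items list
theorem core_eq (x : Int × Int) (l : List (Int × Int)) :
    (PySem.List.min?
      ((x :: l).foldl
        (fun acc p => if p.2 == (PySem.List.max? ((x :: l).map Prod.snd) (fun y => y)).getD 0
                      then acc ++ [p.1] else acc) [])
      (fun y => y)).getD 0
    = (match (x :: l).foldl selStep none with | some b => b.1 | none => 0) := by
  obtain ⟨b, hb, hbmem, hbinv⟩ := sel_inv l x
  have hfold : (x :: l).foldl selStep none = some b := by
    rw [List.foldl_cons]; exact hb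
  rw [hfold]
  obtain ⟨M, hM⟩ : ∃ M, PySem.List.max? ((x :: l).map Prod.snd) (fun y => y) = some M := by
    rcases hopt : PySem.List.max? ((x :: l).map Prod.snd) (fun y => y) with _ | M
    · rw [PySem.List.max?_eq_none_iff] at hopt; simp at hopt
    · exact ⟨M, rfl⟩
  have hMmem : M ∈ (x :: l).map Prod.snd := PySem.List.max?_mem hM
  have hMmax : ∀ y ∈ (x :: l).map Prod.snd, y ≤ M := by
    intro y hy; exact PySem.List.max?_isMax hM y hy
  have hMb : M = b.2 := by
    obtain ⟨q, hq, hq2⟩ := List.mem_map.mp hMmem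
    have h1 : M ≤ b.2 := hq2 ▸ (hbinv q hq).1
    have h2 : b.2 ≤ M := hMmax b.2 (List.mem_map_of_mem hbmem)
    omega
  simp only [hM, Option.getD_some]
  rw [foldl_filter_firsts M (x :: l) []]
  simp only [List.nil_append]
  set mf := ((x :: l).filter (fun p => p.2 == M)).map Prod.fst with hmf
  have hbin : b.1 ∈ mf := by
    rw [hmf]
    exact List.mem_map_of_mem (List.mem_filter.mpr ⟨hbmem, by simp [hMb]⟩)
  obtain ⟨m, hm⟩ : ∃ m, PySem.List.min? mf (fun y => y) = some m := by
    rcases hopt : PySem.List.min? mf (fun y => y) with _ | m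
    · rw [PySem.List.min?_eq_none_iff] at hopt
      rw [hopt] at hbin; simp at hbin
    · exact ⟨m, rfl⟩
  have hmmem : m ∈ mf := PySem.List.min?_mem hm
  have h1 : m ≤ b.1 := PySem.List.min?_isMin hm b.1 hbin
  have h2 : b.1 ≤ m := by
    rw [hmf] at hmmem
    obtain ⟨q, hq, hq1⟩ := List.mem_map.mp hmmem
    have hqf := List.mem_filter.mp hq
    have hq2 : q.2 = b.2 := by have := hqf.2; simp at this; omega
    exact hq1 ▸ (hbinv q hqf.1).2 hq2
  rw [hm]
  simp only [Option.getD_some]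
  omega

-- ===== VERDICT (by name: the statement is the Claim_ definition above) =====
theorem most_occur_spec : Claim_equal_most_occur := by
  intro n _ hpre
  unfold Spec_most_occur most_occur most_occur_alt
  rw [counts_eq]
  simp only []
  rw [PySem.Dict.foldl_insert_getD_add_one_eq_counter]
  have hitems : (PySem.Dict.counter n).items ≠ [] := by
    rw [PySem.Dict.items_counter]
    rcases List.exists_mem_of_ne_nil n hpre with ⟨a, ha⟩
    intro hmap
    rw [List.eq_nil_iff_forall_not_mem] at hmap
    exact hmap _ (List.mem_map_of_mem ((PySem.Set.mem_ofList n a).mpr ha))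
  obtain ⟨x, l, hxl⟩ := List.exists_cons_of_ne_nil hitems
  have hvals : (PySem.Dict.counter n).values = (x :: l).map Prod.snd := by
    show (PySem.Dict.counter n).items.map Prod.snd = _
    rw [hxl]
  rw [hvals, hxl]
  exact core_eq x l
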